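-- pv_equiv track=rewrite | github.com/koreanddinghwan/baekjoonALGO | notnumbered/23304.py | pelin
-- ===== SOURCE A (Python) =====
-- import sys,math
--
-- def pelin(s):
--     result = True
--     half = math.floor(len(s)/2)
--
--     for i in range(half):
--         if s[i] != s[len(s) - i -1]:
--             return False
--
--     half_string = s[:half]
--     half = math.floor(len(half_string) / 2)
--
--     for i in range(half):
--         if half_string[i] != half_string[len(half_string) - i -1]:
--             return False
--
--     return True
-- ===== SOURCE B (Python) =====
-- def pelin(s):
--     half = len(s) // 2
--     first = s[:half]
--     return s == s[::-1] and first == first[::-1]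
-- ===== Notes on version B (the rewrite author's own statement) =====
-- stated objective: idiomatic
-- what changed: Replaces the two index-walking half-scans with reverse-and-compare: build s[::-1] (and first[::-1]) once and use builtin string equality instead of pairwise indexed comparisons with early return.
import Mathlib
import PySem

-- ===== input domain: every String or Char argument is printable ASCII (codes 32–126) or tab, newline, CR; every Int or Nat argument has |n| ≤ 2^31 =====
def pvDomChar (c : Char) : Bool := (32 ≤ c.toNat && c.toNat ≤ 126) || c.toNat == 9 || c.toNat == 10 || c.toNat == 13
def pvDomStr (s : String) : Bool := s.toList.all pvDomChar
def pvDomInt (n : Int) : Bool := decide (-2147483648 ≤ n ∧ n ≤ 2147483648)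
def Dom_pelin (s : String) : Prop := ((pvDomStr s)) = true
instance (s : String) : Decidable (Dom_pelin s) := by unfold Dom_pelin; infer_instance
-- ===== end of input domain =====

-- B replaces A's two index-walking half-scans by reverse-and-compare with builtin equality (idiomatic; same cost).
-- math.floor(len(s)/2) is ported as integer floor division, exact for all realistic lengths (< 2^53).

-- ===== PORT A =====
-- the for-loop with early 'return False': scan the index list, stop at the first mismatch
def pelinScan (cs : List Char) (idxs : List Int) : Bool :=
  match idxs with
  | [] => true
  | i :: rest =>
      if PySem.List.pyGetD cs i ' ' ≠ PySem.List.pyGetD cs (PySem.List.len cs - i - 1) ' ' then false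
      else pelinScan cs rest

def pelin (s : String) : Bool :=
  let cs := s.toList
  let half := PySem.Int.floordiv (PySem.List.len cs) 2
  if pelinScan cs (PySem.List.pyRange 0 half 1) = false then false
  else
    let half_string := PySem.List.slice cs none (some half)
    let half2 := PySem.Int.floordiv (PySem.List.len half_string) 2
    if pelinScan half_string (PySem.List.pyRange 0 half2 1) = false then false
    else true

-- ===== PORT B =====
def pelin_alt (s : String) : Bool :=
  let cs := s.toList
  let half := cs.length / 2
  let first := cs.take half
  (cs == cs.reverse) && (first == first.reverse)

-- ===== PRECONDITION & SPEC =====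
def Spec_pelin (s : String) (out : Bool) : Prop := out = pelin_alt s
instance (s : String) (out : Bool) : Decidable (Spec_pelin s out) := by unfold Spec_pelin; infer_instance

-- ===== CLAIM (what is proved, stated in full; the proofs are below) =====
def Claim_equal_pelin : Prop := ∀ (s : String), Dom_pelin s → Spec_pelin s (pelin s)

-- ===== LEMMAS AND PROOFS =====

-- the early-exit scan is the conjunction over the index list
lemma pelinScan_eq_all (cs : List Char) (idxs : List Int) :
    pelinScan cs idxs =
      idxs.all (fun i => PySem.List.pyGetD cs i ' ' == PySem.List.pyGetD cs (PySem.List.len cs - i - 1) ' ') := by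
  induction idxs with
  | nil => rfl
  | cons i rest ih =>
      rw [pelinScan, ih, List.all_cons]
      simp only [PySem.List.len_eq]
      by_cases h : PySem.List.pyGetD cs i ' ' = PySem.List.pyGetD cs ((cs.length : Int) - i - 1) ' ' <;>
        simp [h]

-- half-scan equals whole-string palindromy
lemma halfScan_eq_reverse (cs : List Char) :
    pelinScan cs (PySem.List.pyRange 0 (PySem.Int.floordiv (PySem.List.len cs) 2) 1) =
      (cs == cs.reverse) := by
  rw [pelinScan_eq_all]
  have hlen : PySem.List.len cs = (cs.length : Int) := PySem.List.len_eq cs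
  have hfd : PySem.Int.floordiv (PySem.List.len cs) 2 = ((cs.length / 2 : Nat) : Int) := by
    rw [hlen]; exact_mod_cast PySem.Int.floordiv_natCast cs.length 2
  rw [hfd]
  -- the per-index check, at a Nat index j, says cs[j] = cs[n-1-j]
  have hidx : ∀ (j : Nat) (hj : j < cs.length),
      ((PySem.List.pyGetD cs ((j : Int)) ' ' ==
         PySem.List.pyGetD cs (PySem.List.len cs - (j : Int) - 1) ' ') = true ↔
       cs[j]'hj = cs[cs.length - 1 - j]'(by omega)) := by
    intro j hj
    have h2 : PySem.List.len cs - (j : Int) - 1 = ((cs.length - j - 1 : Nat) : Int) := by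
      rw [hlen]; omega
    rw [h2, PySem.List.pyGetD_natCast, PySem.List.pyGetD_natCast]
    have e : cs.length - j - 1 = cs.length - 1 - j := by omega
    have hj2 : cs.length - 1 - j < cs.length := by omega
    rw [e]
    simp [List.getD_eq_getElem?_getD, hj, hj2]
  rcases Bool.eq_false_or_eq_true (cs == cs.reverse) with hb | hb
  · rw [hb]
    have hpal : cs = cs.reverse := by simpa using hb
    rw [List.all_eq_true]
    intro x hx
    rw [PySem.List.mem_pyRange_one] at hx
    obtain ⟨hx0, hx1⟩ := hx
    have hjn : x.toNat < cs.length := by omega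
    have hxj : x = ((x.toNat : Nat) : Int) := (Int.toNat_of_nonneg hx0).symm
    rw [hxj, hidx x.toNat hjn]
    have hq := List.getElem?_reverse (l := cs) (i := x.toNat) hjn
    rw [← hpal] at hq
    rw [List.getElem?_eq_getElem hjn, List.getElem?_eq_getElem (by omega)] at hq
    exact Option.some.inj hq
  · rw [hb]
    rw [List.all_eq_false]
    have hne : cs ≠ cs.reverse := by simpa using hb
    by_contra hall
    push Not at hall
    apply hne
    apply List.ext_getElem (by simp)
    intro k hk hk'
    have key : ∀ (j : Nat) (hj : j < cs.length / 2),
        cs[j]'(by omega) = cs[cs.length - 1 - j]'(by omega) := by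
      intro j hj
      have hjm : ((j : Int)) ∈ PySem.List.pyRange 0 ((cs.length / 2 : Nat) : Int) 1 := by
        rw [PySem.List.mem_pyRange_one]
        exact ⟨by positivity, by exact_mod_cast hj⟩
      exact (hidx j (by omega)).mp (hall _ hjm)
    rw [List.getElem_reverse]
    by_cases hk2 : k < cs.length / 2
    · exact key k hk2
    · by_cases hk3 : cs.length - 1 - k < cs.length / 2
      · have hk4 := key _ hk3
        have heq : cs.length - 1 - (cs.length - 1 - k) = k := by omega
        simp only [heq] at hk4
        exact hk4.symm
      · have hmid : cs[k]? = cs[cs.length - 1 - k]? := by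
          rw [show cs.length - 1 - k = k from by omega]
        rw [List.getElem?_eq_getElem hk, List.getElem?_eq_getElem (by omega)] at hmid
        exact Option.some.inj hmid

lemma slice_half (cs : List Char) :
    PySem.List.slice cs none (some (PySem.Int.floordiv (PySem.List.len cs) 2)) =
      cs.take (cs.length / 2) := by
  have hfd : PySem.Int.floordiv (PySem.List.len cs) 2 = ((cs.length / 2 : Nat) : Int) := by
    rw [PySem.List.len_eq]; exact_mod_cast PySem.Int.floordiv_natCast cs.length 2
  rw [hfd, PySem.List.slice_to_natCast]

-- ===== VERDICT (by name: the statement is the Claim_ definition above) =====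
theorem pelin_spec : Claim_equal_pelin := by
  intro s _
  unfold Spec_pelin pelin pelin_alt
  simp only [slice_half, halfScan_eq_reverse]
  cases h1 : (s.toList == s.toList.reverse) <;>
    cases h2 : (s.toList.take (s.toList.length / 2) ==
        (s.toList.take (s.toList.length / 2)).reverse) <;>
    simp
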